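-- pv_equiv track=rewrite | github.com/databricks-industry-solutions/dbxmetagen | src/dbxmetagen/ontology_roles.py | infer_role_from_column_name
-- ===== SOURCE A (Python) =====
-- PII_COLUMN_NAMES: frozenset[str] = frozenset({
--     "email", "phone", "phone_number", "ssn", "social_security_number",
--     "first_name", "last_name", "full_name", "date_of_birth", "dob",
--     "address", "street_address", "home_address", "mrn", "npi",
--     "drivers_license", "passport_number", "credit_card_number",
--     "bank_account_number", "tax_id", "national_id",
-- })
--
-- TEMPORAL_SUFFIXES: tuple[str, ...] = (
--     "_date", "_time", "_at", "_timestamp", "_ts", "_datetime",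
-- )
--
-- TEMPORAL_COLUMN_NAMES: frozenset[str] = frozenset({
--     "date", "time", "timestamp", "created", "updated", "modified",
--     "effective_date", "start_date", "end_date", "birth_date",
-- })
--
-- MEASURE_SUFFIXES: tuple[str, ...] = (
--     "_amount", "_count", "_total", "_value", "_qty", "_quantity",
--     "_rate", "_price", "_cost", "_balance", "_score", "_weight",
--     "_percent", "_pct", "_ratio",
-- )
--
-- DIMENSION_SUFFIXES: tuple[str, ...] = (
--     "_type", "_status", "_code", "_category", "_class", "_group",
--     "_flag", "_level", "_tier", "_mode", "_kind",
-- )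
--
-- AUDIT_COLUMN_NAMES: frozenset[str] = frozenset({
--     "ingest_ts", "ingestion_timestamp", "batch_id", "row_hash",
--     "source_system", "etl_timestamp", "etl_batch_id", "load_date",
--     "load_ts", "created_by_etl", "upload_ts", "_rescued_data",
--     "processing_timestamp",
-- })
--
-- GEO_COLUMN_NAMES: frozenset[str] = frozenset({
--     "country", "country_code", "state", "state_code", "city",
--     "postal_code", "zip_code", "zipcode", "zip", "latitude",
--     "longitude", "lat", "lon", "geo_region", "region", "county",
--     "province", "address",
-- })
--
-- LABEL_COLUMN_NAMES: frozenset[str] = frozenset({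
--     "name", "title", "label", "description", "note_text", "notes",
--     "clinical_summary", "summary", "comment", "text_content", "body",
--     "narrative", "remarks", "free_text", "memo", "abstract",
-- })
--
-- def infer_role_from_column_name(
--     col: str,
--     entity_name: str,
--     all_entity_names: frozenset[str],
-- ) -> str | None:
--     """Infer a property role from a column name using pattern matching.
--
--     Returns the role string or None if no confident match.
--     Used by the curated-bundle property generator.
--     """
--     c = col.lower()
--     ent_lower = entity_name.lower().rstrip("s")
--
--     # PK: {entity}_id or bare "id" for this entity
--     if c == "id" or c == f"{ent_lower}_id" or c == f"{ent_lower}_key":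
--         return "primary_key"
--
--     # FK / object_property: {other_entity}_id where other entity exists
--     if c.endswith(("_id", "_key")):
--         stem = c.rsplit("_", 1)[0]
--         for other in all_entity_names:
--             other_lower = other.lower()
--             # Match singular or plural stem
--             if stem == other_lower or stem == other_lower.rstrip("s") or stem + "s" == other_lower:
--                 return "object_property"
--         return "object_property"  # still an FK even if target unknown
--
--     if c in PII_COLUMN_NAMES:
--         return "pii"
--     if c in AUDIT_COLUMN_NAMES or c.startswith("etl_"):
--         return "audit"
--     if c in GEO_COLUMN_NAMES or c.startswith("geo_"):
--         return "geographic"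
--     if any(c.endswith(s) for s in TEMPORAL_SUFFIXES) or c in TEMPORAL_COLUMN_NAMES:
--         return "temporal"
--     if any(c.endswith(s) for s in MEASURE_SUFFIXES):
--         return "measure"
--     if any(c.endswith(s) for s in DIMENSION_SUFFIXES):
--         return "dimension"
--     if c in LABEL_COLUMN_NAMES:
--         return "label"
--     return None
-- ===== SOURCE B (Python) =====
-- # B: index-based classifier. Instead of A's cascade of endswith/membership tests
-- # (and its FK loop whose result never varies), B splits the column once with
-- # rpartition("_") and classifies by two precomputed lookup tables: an exact-name
-- # table (role sets merged first-wins in A's priority order) and a suffix-token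
-- # table keyed by the word after the last underscore. Since no suffix token
-- # contains "_", c.endswith("_" + t) holds exactly when the last "_"-token of c
-- # equals t, so one rpartition plus one dict lookup replaces all 32 endswith scans.
--
-- PII_COLUMN_NAMES = frozenset({
--     "email", "phone", "phone_number", "ssn", "social_security_number",
--     "first_name", "last_name", "full_name", "date_of_birth", "dob",
--     "address", "street_address", "home_address", "mrn", "npi",
--     "drivers_license", "passport_number", "credit_card_number",
--     "bank_account_number", "tax_id", "national_id",
-- })
-- TEMPORAL_SUFFIXES = ("_date", "_time", "_at", "_timestamp", "_ts", "_datetime")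
-- TEMPORAL_COLUMN_NAMES = frozenset({
--     "date", "time", "timestamp", "created", "updated", "modified",
--     "effective_date", "start_date", "end_date", "birth_date",
-- })
-- MEASURE_SUFFIXES = ("_amount", "_count", "_total", "_value", "_qty", "_quantity",
--                     "_rate", "_price", "_cost", "_balance", "_score", "_weight",
--                     "_percent", "_pct", "_ratio")
-- DIMENSION_SUFFIXES = ("_type", "_status", "_code", "_category", "_class", "_group",
--                       "_flag", "_level", "_tier", "_mode", "_kind")
-- AUDIT_COLUMN_NAMES = frozenset({
--     "ingest_ts", "ingestion_timestamp", "batch_id", "row_hash",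
--     "source_system", "etl_timestamp", "etl_batch_id", "load_date",
--     "load_ts", "created_by_etl", "upload_ts", "_rescued_data",
--     "processing_timestamp",
-- })
-- GEO_COLUMN_NAMES = frozenset({
--     "country", "country_code", "state", "state_code", "city",
--     "postal_code", "zip_code", "zipcode", "zip", "latitude",
--     "longitude", "lat", "lon", "geo_region", "region", "county",
--     "province", "address",
-- })
-- LABEL_COLUMN_NAMES = frozenset({
--     "name", "title", "label", "description", "note_text", "notes",
--     "clinical_summary", "summary", "comment", "text_content", "body",
--     "narrative", "remarks", "free_text", "memo", "abstract",
-- })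
--
-- # Exact-name table, merged first-wins in priority order ("address" is both PII
-- # and geo; PII wins, as in A's cascade).
-- _ROLE_BY_NAME = {}
-- for _names, _role in ((sorted(PII_COLUMN_NAMES), "pii"),
--                       (sorted(AUDIT_COLUMN_NAMES), "audit"),
--                       (sorted(GEO_COLUMN_NAMES), "geographic"),
--                       (sorted(TEMPORAL_COLUMN_NAMES), "temporal"),
--                       (sorted(LABEL_COLUMN_NAMES), "label")):
--     for _n in _names:
--         _ROLE_BY_NAME.setdefault(_n, _role)
--
-- # Suffix-token table: "_date" -> token "date" -> "temporal", etc.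
-- # The token groups are pairwise disjoint, so one flat dict is enough.
-- _ROLE_BY_TOKEN = {s[1:]: role
--                   for sufs, role in ((TEMPORAL_SUFFIXES, "temporal"),
--                                      (MEASURE_SUFFIXES, "measure"),
--                                      (DIMENSION_SUFFIXES, "dimension"))
--                   for s in sufs}
--
-- def infer_role_from_column_name(col, entity_name, all_entity_names):
--     c = col.lower()
--     ent = entity_name.lower().rstrip("s")
--     if c in ("id", ent + "_id", ent + "_key"):
--         return "primary_key"
--     _head, sep, token = c.rpartition("_")
--     if sep and token in ("id", "key"):
--         return "object_property"   # an FK whether or not the target entity is known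
--     role = _ROLE_BY_NAME.get(c)
--     if role is not None:
--         return role
--     if c.startswith("etl_"):
--         return "audit"
--     if c.startswith("geo_"):
--         return "geographic"
--     if sep:
--         return _ROLE_BY_TOKEN.get(token)
--     return None
-- ===== Notes on version B (the rewrite author's own statement) =====
-- stated objective: alternative
-- what changed: B splits the column once with rpartition('_') and classifies via two precomputed lookup tables (an exact-name dict merged first-wins in A's priority order and a suffix-token dict keyed by the word after the last underscore), replacing A's cascade of 32 endswith scans and per-set membership tests and dropping its FK loop over all_entity_names whose result never varies.
import Mathlib
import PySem

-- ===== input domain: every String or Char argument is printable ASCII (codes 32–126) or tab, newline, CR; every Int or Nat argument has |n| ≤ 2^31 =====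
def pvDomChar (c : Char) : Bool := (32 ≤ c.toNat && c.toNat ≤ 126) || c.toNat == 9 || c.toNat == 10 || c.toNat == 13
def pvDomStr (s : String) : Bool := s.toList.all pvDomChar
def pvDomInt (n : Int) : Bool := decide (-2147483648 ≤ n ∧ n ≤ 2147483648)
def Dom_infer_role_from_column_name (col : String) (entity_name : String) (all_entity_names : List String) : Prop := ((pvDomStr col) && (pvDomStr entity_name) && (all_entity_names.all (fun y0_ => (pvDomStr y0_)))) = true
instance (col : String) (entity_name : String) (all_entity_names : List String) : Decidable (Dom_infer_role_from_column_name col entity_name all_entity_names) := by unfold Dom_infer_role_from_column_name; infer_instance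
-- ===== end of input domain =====

set_option maxRecDepth 100000


-- B classifies by one rpartition("_") plus two precomputed lookup tables (exact
-- names merged first-wins in A's priority order; suffix tokens after the last
-- underscore), replacing A's cascade of endswith/membership tests and its FK loop.

-- module constants (shared by both Pythons, hence by both ports)
def pvPII : List String := ["email", "phone", "phone_number", "ssn", "social_security_number",
  "first_name", "last_name", "full_name", "date_of_birth", "dob",
  "address", "street_address", "home_address", "mrn", "npi",
  "drivers_license", "passport_number", "credit_card_number",
  "bank_account_number", "tax_id", "national_id"]
def pvTemporalSuf : List String := ["_date", "_time", "_at", "_timestamp", "_ts", "_datetime"]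
def pvTemporalNames : List String := ["date", "time", "timestamp", "created", "updated", "modified",
  "effective_date", "start_date", "end_date", "birth_date"]
def pvMeasureSuf : List String := ["_amount", "_count", "_total", "_value", "_qty", "_quantity",
  "_rate", "_price", "_cost", "_balance", "_score", "_weight", "_percent", "_pct", "_ratio"]
def pvDimensionSuf : List String := ["_type", "_status", "_code", "_category", "_class", "_group",
  "_flag", "_level", "_tier", "_mode", "_kind"]
def pvAudit : List String := ["ingest_ts", "ingestion_timestamp", "batch_id", "row_hash",
  "source_system", "etl_timestamp", "etl_batch_id", "load_date",
  "load_ts", "created_by_etl", "upload_ts", "_rescued_data", "processing_timestamp"]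
def pvGeo : List String := ["country", "country_code", "state", "state_code", "city",
  "postal_code", "zip_code", "zipcode", "zip", "latitude",
  "longitude", "lat", "lon", "geo_region", "region", "county", "province", "address"]
def pvLabel : List String := ["name", "title", "label", "description", "note_text", "notes",
  "clinical_summary", "summary", "comment", "text_content", "body",
  "narrative", "remarks", "free_text", "memo", "abstract"]

-- exact port of s.rstrip("s"): drop trailing 's' characters
def pvRstripS (s : String) : String :=
  String.ofList ((s.toList.reverse.dropWhile (fun ch => ch == 's')).reverse)

-- ===== PORT A =====
-- exact port of s.rsplit("_", 1)[0]: everything before the last '_', or s if none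
def pvRsplitStem (s : String) : String :=
  match s.toList.reverse.dropWhile (fun ch => ch != '_') with
  | [] => s
  | _ :: rest => String.ofList rest.reverse

-- A's 'for other in all_entity_names' loop in the FK branch
def pvFkScan (stem : String) : List String → Option String
  | [] => some "object_property"  -- still an FK even if target unknown
  | other :: rest =>
    let other_lower := PySem.Str.lower other
    if stem == other_lower || stem == pvRstripS other_lower || stem ++ "s" == other_lower then
      some "object_property"
    else pvFkScan stem rest

def infer_role_from_column_name (col : String) (entity_name : String) (all_entity_names : List String) : Option String :=
  let c := PySem.Str.lower col
  let ent_lower := pvRstripS (PySem.Str.lower entity_name)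
  if c == "id" || c == ent_lower ++ "_id" || c == ent_lower ++ "_key" then some "primary_key"
  else if PySem.Str.endswith c "_id" || PySem.Str.endswith c "_key" then
    pvFkScan (pvRsplitStem c) all_entity_names
  else if pvPII.contains c then some "pii"
  else if pvAudit.contains c || PySem.Str.startswith c "etl_" then some "audit"
  else if pvGeo.contains c || PySem.Str.startswith c "geo_" then some "geographic"
  else if pvTemporalSuf.any (fun s => PySem.Str.endswith c s) || pvTemporalNames.contains c then some "temporal"
  else if pvMeasureSuf.any (fun s => PySem.Str.endswith c s) then some "measure"
  else if pvDimensionSuf.any (fun s => PySem.Str.endswith c s) then some "dimension"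
  else if pvLabel.contains c then some "label"
  else none

-- ===== PORT B =====
-- exact port of c.rpartition("_"): (head, sep, token); ("", "", c) when no '_'
def pvRpartition (s : String) : String × String × String :=
  match s.toList.reverse.dropWhile (fun ch => ch != '_') with
  | [] => ("", "", s)
  | _ :: rest => (String.ofList rest.reverse, "_",
                  String.ofList ((s.toList.reverse.takeWhile (fun ch => ch != '_')).reverse))

-- B's name table: the frozensets in priority order, merged first-wins by setdefault
def pvNamePairs : List (String × String) :=
  pvPII.map (fun n => (n, "pii")) ++ pvAudit.map (fun n => (n, "audit"))
    ++ pvGeo.map (fun n => (n, "geographic")) ++ pvTemporalNames.map (fun n => (n, "temporal"))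
    ++ pvLabel.map (fun n => (n, "label"))

-- dict built with setdefault: insert only when the key is absent (first wins)
def pvSetdefaults (ps : List (String × String)) : List (String × String) :=
  ps.foldl (fun d p => if (d.find? (fun q => q.1 == p.1)).isSome then d else d ++ [p]) []

def pvNameTable : List (String × String) := pvSetdefaults pvNamePairs

-- dict.get : first match in the association list, none if absent
def pvNameGet (c : String) : Option String :=
  (pvNameTable.find? (fun q => q.1 == c)).map Prod.snd

-- s[1:]
def pvDropFirst (s : String) : String := String.ofList (s.toList.drop 1)

-- B's token table: {s[1:]: role} over the three suffix groups (no duplicate keys)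
def pvTokenTable : List (String × String) :=
  pvTemporalSuf.map (fun s => (pvDropFirst s, "temporal"))
    ++ pvMeasureSuf.map (fun s => (pvDropFirst s, "measure"))
    ++ pvDimensionSuf.map (fun s => (pvDropFirst s, "dimension"))

def pvTokGet (t : String) : Option String :=
  (pvTokenTable.find? (fun q => q.1 == t)).map Prod.snd

def infer_role_from_column_name_alt (col : String) (entity_name : String) (all_entity_names : List String) : Option String :=
  let c := PySem.Str.lower col
  let ent := pvRstripS (PySem.Str.lower entity_name)
  -- c in ("id", ent + "_id", ent + "_key")
  if c == "id" || c == ent ++ "_id" || c == ent ++ "_key" then some "primary_key"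
  else
    let r := pvRpartition c
    -- if sep and token in ("id", "key")
    if r.2.1 == "_" && (r.2.2 == "id" || r.2.2 == "key") then some "object_property"
    else
      match pvNameGet c with
      | some role => some role
      | none =>
        if PySem.Str.startswith c "etl_" then some "audit"
        else if PySem.Str.startswith c "geo_" then some "geographic"
        else if r.2.1 == "_" then pvTokGet r.2.2
        else none

-- ===== PRECONDITION & SPEC =====
def Spec_infer_role_from_column_name (col : String) (entity_name : String) (all_entity_names : List String) (out : Option String) : Prop := out = infer_role_from_column_name_alt col entity_name all_entity_names
instance (col : String) (entity_name : String) (all_entity_names : List String) (out : Option String) : Decidable (Spec_infer_role_from_column_name col entity_name all_entity_names out) := by unfold Spec_infer_role_from_column_name; infer_instance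

-- ===== CLAIM =====
def Claim_equal_infer_role_from_column_name : Prop := ∀ (col : String) (entity_name : String) (all_entity_names : List String), Dom_infer_role_from_column_name col entity_name all_entity_names → Spec_infer_role_from_column_name col entity_name all_entity_names (infer_role_from_column_name col entity_name all_entity_names)

-- ===== LEMMAS AND PROOFS =====

-- A's FK loop returns "object_property" no matter what it scans
theorem pvFkScan_const (stem : String) (l : List String) :
    pvFkScan stem l = some "object_property" := by
  induction l with
  | nil => rfl
  | cons other rest ih => simp only [pvFkScan]; split <;> simp [ih]

-- A's tail (everything after the PK/FK branches) and B's tail, as functions of c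
def pvARest (c : String) : Option String :=
  if pvPII.contains c then some "pii"
  else if pvAudit.contains c || PySem.Str.startswith c "etl_" then some "audit"
  else if pvGeo.contains c || PySem.Str.startswith c "geo_" then some "geographic"
  else if pvTemporalSuf.any (fun s => PySem.Str.endswith c s) || pvTemporalNames.contains c then some "temporal"
  else if pvMeasureSuf.any (fun s => PySem.Str.endswith c s) then some "measure"
  else if pvDimensionSuf.any (fun s => PySem.Str.endswith c s) then some "dimension"
  else if pvLabel.contains c then some "label"
  else none

def pvBRest (c : String) : Option String :=
  match pvNameGet c with
  | some role => some role
  | none =>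
    if PySem.Str.startswith c "etl_" then some "audit"
    else if PySem.Str.startswith c "geo_" then some "geographic"
    else if (pvRpartition c).2.1 == "_" then pvTokGet (pvRpartition c).2.2
    else none

-- (reversed view) 'tl ++ [_] is a prefix of rl' characterised by takeWhile/dropWhile,
-- provided tl contains no '_'
theorem pvTokPrefix (rl : List Char) : ∀ tl : List Char, (∀ ch ∈ tl, ch ≠ '_') →
    ((tl ++ ['_']) <+: rl ↔
      rl.dropWhile (fun ch => ch != '_') ≠ [] ∧ rl.takeWhile (fun ch => ch != '_') = tl) := by
  induction rl with
  | nil => intro tl ht; simp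
  | cons a rl ih =>
    intro tl ht
    by_cases ha : a = '_'
    · subst ha
      cases tl with
      | nil => simp
      | cons b tl' =>
        have hb := ht b (by simp)
        simp [List.cons_prefix_cons, hb]
    · have hpa : (a != '_') = true := by simpa using ha
      cases tl with
      | nil =>
        simp [List.cons_prefix_cons, hpa, Ne.symm ha]
      | cons b tl' =>
        have ih' := ih tl' (fun ch hch => ht ch (by simp [hch]))
        simp only [List.cons_append, List.cons_prefix_cons, List.dropWhile_cons,
          List.takeWhile_cons, hpa]
        rw [ih']
        constructor
        · rintro ⟨rfl, hd, htk⟩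
          exact ⟨hd, by simp [htk]⟩
        · rintro ⟨hd, htk⟩
          have h2 : a = b ∧ rl.takeWhile (fun ch => ch != '_') = tl' := by
            constructor
            · have := congrArg (fun l => l.head?) htk
              simpa using this
            · have := congrArg (fun l => l.tail) htk
              simpa using this
          exact ⟨h2.1.symm, hd, h2.2⟩

theorem pvEndswith_tok (c sfx t : String) (hs : sfx.toList = '_' :: t.toList)
    (ht : ∀ ch ∈ t.toList, ch ≠ '_') :
    PySem.Str.endswith c sfx
      = (((pvRpartition c).2.1 == "_") && (t == (pvRpartition c).2.2)) := by
  have hrev : ∀ ch ∈ t.toList.reverse, ch ≠ '_' := by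
    intro ch hch; exact ht ch (List.mem_reverse.mp hch)
  have hiff := pvTokPrefix (c.toList.reverse) t.toList.reverse hrev
  rw [Bool.eq_iff_iff]
  have hend : PySem.Str.endswith c sfx = PySem.Chars.endswith c.toList sfx.toList := by simp
  rw [hend]
  rw [PySem.Chars.endswith_iff, hs]
  rw [← List.reverse_prefix]
  simp only [List.reverse_cons]
  rw [hiff]
  unfold pvRpartition
  cases hdrop : c.toList.reverse.dropWhile (fun ch => ch != '_') with
  | nil => simp
  | cons x xs =>
    simp only [ne_eq, reduceCtorEq, not_false_eq_true, true_and,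
      Bool.and_eq_true, beq_iff_eq]
    constructor
    · intro htk
      rw [htk, List.reverse_reverse, String.ofList_toList]
    · intro htk
      rw [htk]
      simp [String.toList_ofList]
-- lookup in the setdefault-built table = first match in the raw pair list
theorem pvFind?_setdefaults_go (k : String) (ps : List (String × String)) : ∀ d : List (String × String),
    (ps.foldl (fun d p => if (d.find? (fun q => q.1 == p.1)).isSome then d else d ++ [p]) d).find?
        (fun q => q.1 == k)
      = (d.find? (fun q => q.1 == k)).or (ps.find? (fun q => q.1 == k)) := by
  induction ps with
  | nil => intro d; simp
  | cons p ps ih =>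
    intro d
    simp only [List.foldl_cons]
    rw [ih]
    by_cases hp : (p.1 == k) = true
    · cases eq_of_beq hp
      by_cases hd : (d.find? (fun q => q.1 == p.1)).isSome
      · simp only [hd, if_pos]
        obtain ⟨v, hv⟩ := Option.isSome_iff_exists.mp hd
        rw [hv]
        simp
      · simp only [hd, if_neg, Bool.false_eq_true, not_false_eq_true]
        have hdn : d.find? (fun q => q.1 == p.1) = none := by
          cases h : d.find? (fun q => q.1 == p.1)
          · rfl
          · exact absurd (by rw [h]; rfl) hd
        rw [List.find?_append, hdn]
        simp
    · have hcons : List.find? (fun q => q.1 == k) (p :: ps) = ps.find? (fun q => q.1 == k) := by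
        simp [hp]
      rw [hcons]
      by_cases hd : (d.find? (fun q => q.1 == p.1)).isSome
      · simp [hd]
      · simp only [hd, Bool.false_eq_true, not_false_eq_true, if_neg]
        rw [List.find?_append]
        have : List.find? (fun q => q.1 == k) [p] = none := by simp [List.find?, hp]
        rw [this]
        simp

theorem pvNameGet_eq (c : String) :
    pvNameGet c = (pvNamePairs.find? (fun q => q.1 == c)).map Prod.snd := by
  unfold pvNameGet pvNameTable pvSetdefaults
  rw [pvFind?_setdefaults_go]
  simp

-- the token table, written as its three key groups
theorem pvTokenTable_eq : pvTokenTable =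
    (["date", "time", "at", "timestamp", "ts", "datetime"].map (fun k => (k, "temporal")))
      ++ ((["amount", "count", "total", "value", "qty", "quantity", "rate", "price", "cost",
            "balance", "score", "weight", "percent", "pct", "ratio"].map (fun k => (k, "measure")))
        ++ ((["type", "status", "code", "category", "class", "group", "flag", "level", "tier",
              "mode", "kind"].map (fun k => (k, "dimension"))) ++ [])) := by decide

-- first-match lookup over one key group of the token table
theorem pvFindGroup (tok r : String) (ks : List String) (rest : List (String × String)) :
    ((ks.map (fun k => (k, r)) ++ rest).find? (fun q => q.1 == tok)).map Prod.snd
      = if ks.any (fun k => k == tok) then some r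
        else (rest.find? (fun q => q.1 == tok)).map Prod.snd := by
  induction ks with
  | nil => simp
  | cons k ks ih =>
    rw [List.map_cons, List.cons_append, List.any_cons]
    by_cases hk : (k == tok) = true
    · rw [List.find?_cons_of_pos (by simpa using hk)]
      simp [hk]
    · have hk' : (k == tok) = false := by simpa using hk
      rw [List.find?_cons_of_neg (by simpa using hk), ih]
      simp [hk']

-- every exact name in the table: A's cascade agrees with first-match lookup
theorem pvNames_check : pvNamePairs.all
    (fun p => pvARest p.1 == (pvNamePairs.find? (fun q => q.1 == p.1)).map Prod.snd) = true := by
  decide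

theorem pvTails_eq (c : String) : pvARest c = pvBRest c := by
  cases hname : pvNameGet c with
  | some role =>
    have h : (pvNamePairs.find? (fun q => q.1 == c)).map Prod.snd = some role := by
      rw [← pvNameGet_eq]; exact hname
    obtain ⟨p, hp, hrole⟩ := Option.map_eq_some_iff.mp h
    have hmem := List.mem_of_find?_eq_some hp
    have hpred := List.find?_some hp
    have hc : p.1 = c := by simpa using hpred
    have hall := List.all_eq_true.mp pvNames_check p hmem
    rw [hc] at hall
    have hA : pvARest c = (pvNamePairs.find? (fun q => q.1 == c)).map Prod.snd := eq_of_beq hall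
    rw [hA, h]
    unfold pvBRest
    rw [hname]
  | none =>
    have hfind : pvNamePairs.find? (fun q => q.1 == c) = none := by
      have h := pvNameGet_eq c
      rw [hname] at h
      exact Option.map_eq_none_iff.mp h.symm
    have hnotin := List.find?_eq_none.mp hfind
    have key : ∀ (L : List String) (role : String), (∀ x ∈ L, (x, role) ∈ pvNamePairs) →
        L.contains c = false := by
      intro L role hsub
      cases h : L.contains c with
      | false => rfl
      | true =>
        have hm : c ∈ L := by simpa using h
        have := hnotin (c, role) (hsub c hm)
        simp at this
    have hpii : pvPII.contains c = false := key pvPII "pii" (by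
      intro x hx; unfold pvNamePairs
      simp only [List.mem_append, List.mem_map]
      exact Or.inl (Or.inl (Or.inl (Or.inl ⟨x, hx, rfl⟩))))
    have haudit : pvAudit.contains c = false := key pvAudit "audit" (by
      intro x hx; unfold pvNamePairs
      simp only [List.mem_append, List.mem_map]
      exact Or.inl (Or.inl (Or.inl (Or.inr ⟨x, hx, rfl⟩))))
    have hgeo : pvGeo.contains c = false := key pvGeo "geographic" (by
      intro x hx; unfold pvNamePairs
      simp only [List.mem_append, List.mem_map]
      exact Or.inl (Or.inl (Or.inr ⟨x, hx, rfl⟩)))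
    have htemp : pvTemporalNames.contains c = false := key pvTemporalNames "temporal" (by
      intro x hx; unfold pvNamePairs
      simp only [List.mem_append, List.mem_map]
      exact Or.inl (Or.inr ⟨x, hx, rfl⟩))
    have hlabel : pvLabel.contains c = false := key pvLabel "label" (by
      intro x hx; unfold pvNamePairs
      simp only [List.mem_append, List.mem_map]
      exact Or.inr ⟨x, hx, rfl⟩)
    have e_date := pvEndswith_tok c "_date" "date" (by decide) (by simp)
    have e_time := pvEndswith_tok c "_time" "time" (by decide) (by simp)
    have e_at := pvEndswith_tok c "_at" "at" (by decide) (by simp)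
    have e_timestamp := pvEndswith_tok c "_timestamp" "timestamp" (by decide) (by simp)
    have e_ts := pvEndswith_tok c "_ts" "ts" (by decide) (by simp)
    have e_datetime := pvEndswith_tok c "_datetime" "datetime" (by decide) (by simp)
    have e_amount := pvEndswith_tok c "_amount" "amount" (by decide) (by simp)
    have e_count := pvEndswith_tok c "_count" "count" (by decide) (by simp)
    have e_total := pvEndswith_tok c "_total" "total" (by decide) (by simp)
    have e_value := pvEndswith_tok c "_value" "value" (by decide) (by simp)
    have e_qty := pvEndswith_tok c "_qty" "qty" (by decide) (by simp)
    have e_quantity := pvEndswith_tok c "_quantity" "quantity" (by decide) (by simp)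
    have e_rate := pvEndswith_tok c "_rate" "rate" (by decide) (by simp)
    have e_price := pvEndswith_tok c "_price" "price" (by decide) (by simp)
    have e_cost := pvEndswith_tok c "_cost" "cost" (by decide) (by simp)
    have e_balance := pvEndswith_tok c "_balance" "balance" (by decide) (by simp)
    have e_score := pvEndswith_tok c "_score" "score" (by decide) (by simp)
    have e_weight := pvEndswith_tok c "_weight" "weight" (by decide) (by simp)
    have e_percent := pvEndswith_tok c "_percent" "percent" (by decide) (by simp)
    have e_pct := pvEndswith_tok c "_pct" "pct" (by decide) (by simp)
    have e_ratio := pvEndswith_tok c "_ratio" "ratio" (by decide) (by simp)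
    have e_type := pvEndswith_tok c "_type" "type" (by decide) (by simp)
    have e_status := pvEndswith_tok c "_status" "status" (by decide) (by simp)
    have e_code := pvEndswith_tok c "_code" "code" (by decide) (by simp)
    have e_category := pvEndswith_tok c "_category" "category" (by decide) (by simp)
    have e_class := pvEndswith_tok c "_class" "class" (by decide) (by simp)
    have e_group := pvEndswith_tok c "_group" "group" (by decide) (by simp)
    have e_flag := pvEndswith_tok c "_flag" "flag" (by decide) (by simp)
    have e_level := pvEndswith_tok c "_level" "level" (by decide) (by simp)
    have e_tier := pvEndswith_tok c "_tier" "tier" (by decide) (by simp)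
    have e_mode := pvEndswith_tok c "_mode" "mode" (by decide) (by simp)
    have e_kind := pvEndswith_tok c "_kind" "kind" (by decide) (by simp)
    unfold pvARest pvBRest
    rw [hname]
    rw [hpii, haudit, hgeo, htemp, hlabel]
    simp only [Bool.or_false, Bool.false_or, Bool.false_eq_true, if_false]
    cases hetl : PySem.Str.startswith c "etl_" with
    | true => simp
    | false =>
      simp only [Bool.false_eq_true, if_false]
      cases hgeop : PySem.Str.startswith c "geo_" with
      | true => simp
      | false =>
        simp only [Bool.false_eq_true, if_false]
        simp only [pvTemporalSuf, pvMeasureSuf, pvDimensionSuf, List.any_cons, List.any_nil,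
          Bool.or_false]
        simp only [e_date, e_time, e_at, e_timestamp, e_ts, e_datetime, e_amount, e_count,
          e_total, e_value, e_qty, e_quantity, e_rate, e_price, e_cost, e_balance, e_score,
          e_weight, e_percent, e_pct, e_ratio, e_type, e_status, e_code, e_category, e_class,
          e_group, e_flag, e_level, e_tier, e_mode, e_kind]
        cases hsep : ((pvRpartition c).2.1 == "_") with
        | false => simp
        | true =>
          simp only [Bool.true_and, if_true]
          unfold pvTokGet
          rw [pvTokenTable_eq, pvFindGroup, pvFindGroup, pvFindGroup]
          simp only [List.find?_nil, Option.map_none, List.any_cons, List.any_nil, Bool.or_false]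

-- the whole functions, after abstracting the two locals c and ent
theorem pvMain (c ent : String) (a : List String) :
    (if c == "id" || c == ent ++ "_id" || c == ent ++ "_key" then some "primary_key"
     else if PySem.Str.endswith c "_id" || PySem.Str.endswith c "_key" then
       pvFkScan (pvRsplitStem c) a
     else pvARest c)
    = (if c == "id" || c == ent ++ "_id" || c == ent ++ "_key" then some "primary_key"
       else if (pvRpartition c).2.1 == "_" && ((pvRpartition c).2.2 == "id" || (pvRpartition c).2.2 == "key") then some "object_property"
       else pvBRest c) := by
  have e_id := pvEndswith_tok c "_id" "id" (by decide) (by simp)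
  have e_key := pvEndswith_tok c "_key" "key" (by decide) (by simp)
  cases hpk : (c == "id" || c == ent ++ "_id" || c == ent ++ "_key") with
  | true => simp
  | false =>
    simp only [Bool.false_eq_true, if_false]
    have hfk : (PySem.Str.endswith c "_id" || PySem.Str.endswith c "_key")
        = ((pvRpartition c).2.1 == "_" && ((pvRpartition c).2.2 == "id" || (pvRpartition c).2.2 == "key")) := by
      rw [e_id, e_key, ← Bool.and_or_distrib_left]
      have h1 : (("id" : String) == (pvRpartition c).2.2) = ((pvRpartition c).2.2 == "id") :=
        Bool.beq_comm
      have h2 : (("key" : String) == (pvRpartition c).2.2) = ((pvRpartition c).2.2 == "key") :=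
        Bool.beq_comm
      rw [h1, h2]
    rw [hfk]
    cases hf : ((pvRpartition c).2.1 == "_" && ((pvRpartition c).2.2 == "id" || (pvRpartition c).2.2 == "key")) with
    | true => simp [pvFkScan_const]
    | false => simp only [Bool.false_eq_true, if_false]; exact pvTails_eq c

-- ===== VERDICT =====
theorem infer_role_from_column_name_spec : Claim_equal_infer_role_from_column_name := by
  intro col entity_name all_entity_names _
  unfold Spec_infer_role_from_column_name
  unfold infer_role_from_column_name infer_role_from_column_name_alt
  exact pvMain (PySem.Str.lower col) (pvRstripS (PySem.Str.lower entity_name)) all_entity_names
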